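-- pv_equiv track=rewrite | github.com/zieglerr/ccobra | benchmarks/spatial/models/VerbalReasonerHelpers/Encoder.py | encode_between
-- ===== SOURCE A (Python) =====
-- def encode_between(task, encoding):
--     """ Encode relation between to be represented with relations left and right in a task.
--
--     A task contains multiple premises. A premises includes multiple objects connected by a spatial relation.
--     Encoding example: [between;B;C;D] becomes 1) [left;B;C] and 2) [left;C,D].
--
--     Parameters
--     ----------
--     task : list(str)
--         Task description.
--     encoding : int
--         Integer representing the type of encoding chosen.
--
--     Returns
--     ----------
--     enc_task : list(str)
--         Encoded task description.
--     """
--     enc_task = []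
--     for premise in task:
--         if premise[0] == 'between':
--             if encoding == 1:
--                 # BCD or CBD
--                 # between;B,C,D to:
--                 # 1 left;B;D
--                 # 2 left;C,D
--                 premise1 = ['left', premise[1], premise[3]]
--                 premise2 = ['left', premise[2], premise[3]]
--             elif encoding == 2:
--                 # BCD
--                 # between;B,C,D to
--                 # 1 left;B;C
--                 # 2 left;C;D
--                 premise1 = ['left', premise[1], premise[2]]
--                 premise2 = ['left', premise[2], premise[3]]
--             elif encoding == 3:
--                 # DCB
--                 # between;B,C,D to
--                 # 1 left;C;B
--                 # 2 left;D;C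
--                 premise1 = ['left', premise[2], premise[1]]
--                 premise2 = ['left', premise[3], premise[2]]
--             elif encoding == 4:
--                 # DCB or CBD
--                 # between;B,C,D to:
--                 # 1 left;D;B
--                 # 2 left;C,B
--                 premise1 = ['left', premise[3], premise[1]]
--                 premise2 = ['left', premise[2], premise[1]]
--             elif encoding == 5:
--                 # BCD with right
--                 # between;B;C;D to:
--                 # 1 right;C;B
--                 # 2 right;D;C
--                 premise1 = ['right', premise[2], premise[1]]
--                 premise2 = ['right', premise[3], premise[2]]
--             elif encoding == 6:
--                 # DCB with right
--                 # between;B;C;D to: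
--                 # 1 right;B;C
--                 # 2 right;C;D
--                 premise1 = ['right', premise[1], premise[2]]
--                 premise2 = ['right', premise[2], premise[3]]
--             elif encoding == 7:
--                 # BCD with mix left & right
--                 # between;B;C;D to:
--                 # 1 left;B;C
--                 # 2 right;D;C
--                 premise1 = ['left', premise[1], premise[2]]
--                 premise2 = ['right', premise[3], premise[2]]
--             elif encoding == 8:
--                 # DCB with mix left & right
--                 # between;B;C;D to:
--                 # 1 right;B;C
--                 # 2 left;D;C
--                 premise1 = ['right', premise[1], premise[2]]
--                 premise2 = ['left', premise[3], premise[2]]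
--             else:
--                 raise UnboundLocalError('A premise is lost in encoding')
--             enc_task.append(premise1)
--             enc_task.append(premise2)
--         else:
--             enc_task.append(premise)
--     return enc_task
-- ===== SOURCE B (Python) =====
-- _PATTERNS = {
--     1: ('left', 1, 3, 'left', 2, 3),
--     2: ('left', 1, 2, 'left', 2, 3),
--     3: ('left', 2, 1, 'left', 3, 2),
--     4: ('left', 3, 1, 'left', 2, 1),
--     5: ('right', 2, 1, 'right', 3, 2),
--     6: ('right', 1, 2, 'right', 2, 3),
--     7: ('left', 1, 2, 'right', 3, 2),
--     8: ('right', 1, 2, 'left', 3, 2),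
-- }
--
--
-- def _expand(premise, encoding):
--     """Encoded form of one premise: a list of one or two premises."""
--     if premise[0] != 'between':
--         return [premise]
--     spec = _PATTERNS.get(encoding)
--     if spec is None:
--         raise UnboundLocalError('A premise is lost in encoding')
--     r1, i1, j1, r2, i2, j2 = spec
--     return [[r1, premise[i1], premise[j1]], [r2, premise[i2], premise[j2]]]
--
--
-- def encode_between(task, encoding):
--     if not task:
--         return []
--     return _expand(task[0], encoding) + encode_between(task[1:], encoding)
-- ===== Notes on version B (the rewrite author's own statement) =====
-- stated objective: simpler
-- what changed: Replaces A's imperative accumulator loop with an 8-way elif ladder by a structural recursion on the task that concatenates the results of a per-premise expansion helper driven by a lookup table of relation labels and index pairs.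
import Mathlib
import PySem

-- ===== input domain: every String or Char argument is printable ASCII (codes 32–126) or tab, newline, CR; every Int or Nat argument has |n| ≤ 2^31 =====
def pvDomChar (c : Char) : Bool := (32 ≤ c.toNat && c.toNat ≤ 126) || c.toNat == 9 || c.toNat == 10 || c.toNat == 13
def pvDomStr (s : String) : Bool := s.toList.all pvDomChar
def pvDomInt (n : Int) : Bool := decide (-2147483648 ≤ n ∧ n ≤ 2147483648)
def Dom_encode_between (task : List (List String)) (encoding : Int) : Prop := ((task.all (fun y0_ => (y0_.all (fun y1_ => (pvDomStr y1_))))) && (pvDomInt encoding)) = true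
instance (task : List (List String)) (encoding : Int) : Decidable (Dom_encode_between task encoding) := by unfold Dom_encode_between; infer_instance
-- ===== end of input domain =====

-- B replaces A's accumulator loop with an 8-way elif ladder by a structural recursion
-- on the task concatenating a per-premise expansion driven by a lookup table (objective: simpler).
-- Where the Python raises (empty premise, short 'between' premise, encoding outside 1..8)
-- both programs raise; those inputs are excluded by Pre_.

-- ===== PORT A =====
-- premise[i] for an index known in range (inside Pre_); exact there.
def pvIdx (xs : List String) (i : Int) : String := (PySem.List.pyGet? xs i).getD ""

def encode_between (task : List (List String)) (encoding : Int) : List (List String) :=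
  task.foldl (fun enc_task premise =>
    if PySem.List.pyGet? premise 0 = some "between" then
      if encoding = 1 then
        enc_task ++ [["left", pvIdx premise 1, pvIdx premise 3], ["left", pvIdx premise 2, pvIdx premise 3]]
      else if encoding = 2 then
        enc_task ++ [["left", pvIdx premise 1, pvIdx premise 2], ["left", pvIdx premise 2, pvIdx premise 3]]
      else if encoding = 3 then
        enc_task ++ [["left", pvIdx premise 2, pvIdx premise 1], ["left", pvIdx premise 3, pvIdx premise 2]]
      else if encoding = 4 then
        enc_task ++ [["left", pvIdx premise 3, pvIdx premise 1], ["left", pvIdx premise 2, pvIdx premise 1]]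
      else if encoding = 5 then
        enc_task ++ [["right", pvIdx premise 2, pvIdx premise 1], ["right", pvIdx premise 3, pvIdx premise 2]]
      else if encoding = 6 then
        enc_task ++ [["right", pvIdx premise 1, pvIdx premise 2], ["right", pvIdx premise 2, pvIdx premise 3]]
      else if encoding = 7 then
        enc_task ++ [["left", pvIdx premise 1, pvIdx premise 2], ["right", pvIdx premise 3, pvIdx premise 2]]
      else if encoding = 8 then
        enc_task ++ [["right", pvIdx premise 1, pvIdx premise 2], ["left", pvIdx premise 3, pvIdx premise 2]]
      else
        enc_task  -- Python raises UnboundLocalError here; outside Pre_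
    else
      enc_task ++ [premise]) []

-- ===== PORT B =====
-- _PATTERNS.get(encoding)
def pvPatterns (encoding : Int) : Option (String × Int × Int × String × Int × Int) :=
  if encoding = 1 then some ("left", 1, 3, "left", 2, 3)
  else if encoding = 2 then some ("left", 1, 2, "left", 2, 3)
  else if encoding = 3 then some ("left", 2, 1, "left", 3, 2)
  else if encoding = 4 then some ("left", 3, 1, "left", 2, 1)
  else if encoding = 5 then some ("right", 2, 1, "right", 3, 2)
  else if encoding = 6 then some ("right", 1, 2, "right", 2, 3)
  else if encoding = 7 then some ("left", 1, 2, "right", 3, 2)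
  else if encoding = 8 then some ("right", 1, 2, "left", 3, 2)
  else none

-- _expand(premise, encoding)
def pvExpand (premise : List String) (encoding : Int) : List (List String) :=
  if PySem.List.pyGet? premise 0 ≠ some "between" then
    [premise]
  else
    match pvPatterns encoding with
    | none => []  -- Python raises UnboundLocalError here; outside Pre_
    | some (r1, i1, j1, r2, i2, j2) =>
        [[r1, pvIdx premise i1, pvIdx premise j1], [r2, pvIdx premise i2, pvIdx premise j2]]

def encode_between_alt (task : List (List String)) (encoding : Int) : List (List String) :=
  match task with
  | [] => []
  | premise :: rest => pvExpand premise encoding ++ encode_between_alt rest encoding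

-- ===== PRECONDITION & SPEC =====
-- Pre_ excludes exactly the inputs on which the Python raises: a task with an empty
-- premise (IndexError on premise[0]), or containing a 'between' premise while the
-- encoding is outside 1..8 (UnboundLocalError) or that premise has fewer than 4
-- entries (IndexError).
def Pre_encode_between (task : List (List String)) (encoding : Int) : Prop :=
  ∀ p ∈ task, p ≠ [] ∧ (p.head? = some "between" → 4 ≤ p.length ∧ 1 ≤ encoding ∧ encoding ≤ 8)
instance (task : List (List String)) (encoding : Int) : Decidable (Pre_encode_between task encoding) := by unfold Pre_encode_between; infer_instance

def pvWitness_encode_between : List (List String) × Int :=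
  ([["between", "B", "C", "D"], ["left", "A", "B"]], 2)

def Spec_encode_between (task : List (List String)) (encoding : Int) (out : List (List String)) : Prop := out = encode_between_alt task encoding
instance (task : List (List String)) (encoding : Int) (out : List (List String)) : Decidable (Spec_encode_between task encoding out) := by unfold Spec_encode_between; infer_instance

-- ===== CLAIM (what is proved, stated in full; the proofs are below) =====
def Claim_equal_encode_between : Prop := ∀ (task : List (List String)) (encoding : Int), Dom_encode_between task encoding → Pre_encode_between task encoding → Spec_encode_between task encoding (encode_between task encoding)

-- ===== LEMMAS AND PROOFS =====

-- A's per-premise step, on a premise admitted by Pre_, appends exactly B's expansion.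
theorem pv_step_eq (encoding : Int) (p : List String) (acc : List (List String))
    (hp : p ≠ []) (hb : p.head? = some "between" → 4 ≤ p.length ∧ 1 ≤ encoding ∧ encoding ≤ 8) :
    (if PySem.List.pyGet? p 0 = some "between" then
      if encoding = 1 then
        acc ++ [["left", pvIdx p 1, pvIdx p 3], ["left", pvIdx p 2, pvIdx p 3]]
      else if encoding = 2 then
        acc ++ [["left", pvIdx p 1, pvIdx p 2], ["left", pvIdx p 2, pvIdx p 3]]
      else if encoding = 3 then
        acc ++ [["left", pvIdx p 2, pvIdx p 1], ["left", pvIdx p 3, pvIdx p 2]]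
      else if encoding = 4 then
        acc ++ [["left", pvIdx p 3, pvIdx p 1], ["left", pvIdx p 2, pvIdx p 1]]
      else if encoding = 5 then
        acc ++ [["right", pvIdx p 2, pvIdx p 1], ["right", pvIdx p 3, pvIdx p 2]]
      else if encoding = 6 then
        acc ++ [["right", pvIdx p 1, pvIdx p 2], ["right", pvIdx p 2, pvIdx p 3]]
      else if encoding = 7 then
        acc ++ [["left", pvIdx p 1, pvIdx p 2], ["right", pvIdx p 3, pvIdx p 2]]
      else if encoding = 8 then
        acc ++ [["right", pvIdx p 1, pvIdx p 2], ["left", pvIdx p 3, pvIdx p 2]]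
      else acc
    else acc ++ [p]) = acc ++ pvExpand p encoding := by
  by_cases h : PySem.List.pyGet? p 0 = some "between"
  · have hhead : p.head? = some "between" := by
      cases p with
      | nil => simp [PySem.List.pyGet?] at h
      | cons a l => simpa [PySem.List.pyGet?_zero_cons] using h
    obtain ⟨-, h1, h8⟩ := hb hhead
    interval_cases encoding <;> simp [h, pvExpand, pvPatterns]
  · simp [h, pvExpand]

-- A's fold from any accumulator equals the accumulator followed by B's recursion.
theorem pv_fold_eq (encoding : Int) (task : List (List String)) (acc : List (List String))
    (hpre : Pre_encode_between task encoding) :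
    task.foldl (fun enc_task premise =>
      if PySem.List.pyGet? premise 0 = some "between" then
        if encoding = 1 then
          enc_task ++ [["left", pvIdx premise 1, pvIdx premise 3], ["left", pvIdx premise 2, pvIdx premise 3]]
        else if encoding = 2 then
          enc_task ++ [["left", pvIdx premise 1, pvIdx premise 2], ["left", pvIdx premise 2, pvIdx premise 3]]
        else if encoding = 3 then
          enc_task ++ [["left", pvIdx premise 2, pvIdx premise 1], ["left", pvIdx premise 3, pvIdx premise 2]]
        else if encoding = 4 then
          enc_task ++ [["left", pvIdx premise 3, pvIdx premise 1], ["left", pvIdx premise 2, pvIdx premise 1]]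
        else if encoding = 5 then
          enc_task ++ [["right", pvIdx premise 2, pvIdx premise 1], ["right", pvIdx premise 3, pvIdx premise 2]]
        else if encoding = 6 then
          enc_task ++ [["right", pvIdx premise 1, pvIdx premise 2], ["right", pvIdx premise 2, pvIdx premise 3]]
        else if encoding = 7 then
          enc_task ++ [["left", pvIdx premise 1, pvIdx premise 2], ["right", pvIdx premise 3, pvIdx premise 2]]
        else if encoding = 8 then
          enc_task ++ [["right", pvIdx premise 1, pvIdx premise 2], ["left", pvIdx premise 3, pvIdx premise 2]]
        else enc_task
      else enc_task ++ [premise]) acc = acc ++ encode_between_alt task encoding := by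
  induction task generalizing acc with
  | nil => simp [encode_between_alt]
  | cons p rest ih =>
      obtain ⟨hp, hb⟩ := hpre p (List.mem_cons_self ..)
      have hrest : Pre_encode_between rest encoding := fun q hq => hpre q (List.mem_cons_of_mem _ hq)
      simp only [List.foldl_cons]
      rw [pv_step_eq encoding p acc hp hb, ih _ hrest, encode_between_alt, List.append_assoc]

-- ===== VERDICT (by name: the statement is the Claim_ definition above) =====
theorem encode_between_spec : Claim_equal_encode_between := by
  intro task encoding _ hpre
  unfold Spec_encode_between encode_between
  simpa using pv_fold_eq encoding task [] hpre
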